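-- pv_equiv track=rewrite | github.com/noosdev0/KLinterSel | KLinterSel_v0.3Win.py | create_combination_dict
-- ===== SOURCE A (Python) =====
-- from itertools import combinations
--
-- def create_combination_dict(n, keyname='A'):
--     elements = [f'{keyname}{i+1}' for i in range(n)]
--     combination_dict = {}
--
--     ini=len(keyname)
--
--     for r in range(2, n + 1):
--         for combo in combinations(elements, r):
--             # Extraer los números de los elementos y concatenarlos
--             numbers = [elem[ini:] for elem in combo]
--             key = keyname + ''.join(numbers)
--             combination_dict[key] = []
--
--     return combination_dict
-- ===== SOURCE B (Python) =====
-- def create_combination_dict(n, keyname='A'):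
--     # Build the number-suffix strings directly by recursion over (start, r),
--     # instead of materialising element strings and slicing itertools output.
--     def combos(start, r):
--         if r == 0:
--             return ['']
--         out = []
--         for i in range(start, n + 1):
--             for tail in combos(i + 1, r - 1):
--                 out.append(str(i) + tail)
--         return out
--
--     d = {}
--     for r in range(2, n + 1):
--         for suffix in combos(1, r):
--             d[keyname + suffix] = []
--     return d
-- ===== Notes on version B (the rewrite author's own statement) =====
-- stated objective: alternative
-- what changed: B generates the numeric key suffixes directly with a recursive combination generator over the integers 1..n, instead of materialising element strings, calling itertools.combinations on them and slicing the keyname prefix back off each element.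
import Mathlib
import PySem

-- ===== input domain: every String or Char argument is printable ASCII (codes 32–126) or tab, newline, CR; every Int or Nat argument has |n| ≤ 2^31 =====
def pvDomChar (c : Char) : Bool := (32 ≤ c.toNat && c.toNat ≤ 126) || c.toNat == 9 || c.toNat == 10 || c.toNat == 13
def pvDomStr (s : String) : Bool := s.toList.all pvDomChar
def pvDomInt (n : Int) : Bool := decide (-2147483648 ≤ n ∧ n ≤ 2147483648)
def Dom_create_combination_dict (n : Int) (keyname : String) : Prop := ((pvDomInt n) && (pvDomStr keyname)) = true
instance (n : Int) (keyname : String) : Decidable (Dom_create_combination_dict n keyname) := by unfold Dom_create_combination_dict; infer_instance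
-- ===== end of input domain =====

-- B replaces A's elements-list + itertools.combinations + string-slicing traversal by a direct
-- recursive generator of the numeric suffix strings (objective: alternative, same cost).

-- ===== PORT A =====
-- itertools.combinations(xs, r) in lexicographic order (exact: picks preserve position order)
def pvCombosA {α : Type} (xs : List α) (r : Nat) : List (List α) :=
  match r, xs with
  | 0, _ => [[]]
  | _ + 1, [] => []
  | r + 1, x :: rest => (pvCombosA rest r).map (fun c => x :: c) ++ pvCombosA rest (r + 1)

def create_combination_dict (n : Int) (keyname : String) : List (String × List String) :=
  let elements := (PySem.List.pyRange 0 n 1).map (fun i => keyname ++ PySem.Int.toStr (i + 1))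
  let ini : Int := PySem.Str.len keyname
  (((PySem.List.pyRange 2 (n + 1) 1).foldl (fun d r =>
      (pvCombosA elements r.toNat).foldl (fun d combo =>
        let numbers := combo.map (fun elem => PySem.Str.slice elem (some ini) none)
        let key := keyname ++ PySem.Str.join "" numbers
        d.insert key ([] : List String)) d)
    (PySem.Dict.empty : PySem.Dict String (List String))).items)

-- ===== PORT B =====
-- Source B's inner recursive generator combos(start, r) (recursion on r; loop over i in range(start, n+1))
def pvCombosB (n : Int) : Nat → Int → List String
  | 0, _ => [""]
  | r + 1, start =>
    (PySem.List.pyRange start (n + 1) 1).foldl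
      (fun out i =>
        (pvCombosB n r (i + 1)).foldl
          (fun out tail => out ++ [PySem.Int.toStr i ++ tail]) out) []

def create_combination_dict_alt (n : Int) (keyname : String) : List (String × List String) :=
  (((PySem.List.pyRange 2 (n + 1) 1).foldl (fun d r =>
      (pvCombosB n r.toNat 1).foldl (fun d suffix =>
        d.insert (keyname ++ suffix) ([] : List String)) d)
    (PySem.Dict.empty : PySem.Dict String (List String))).items)

-- ===== PRECONDITION & SPEC =====
def Spec_create_combination_dict (n : Int) (keyname : String) (out : List (String × List String)) : Prop := out = create_combination_dict_alt n keyname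
instance (n : Int) (keyname : String) (out : List (String × List String)) : Decidable (Spec_create_combination_dict n keyname out) := by unfold Spec_create_combination_dict; infer_instance

-- ===== CLAIM (what is proved, stated in full; the proofs are below) =====
def Claim_equal_create_combination_dict : Prop := ∀ (n : Int) (keyname : String), Dom_create_combination_dict n keyname → Spec_create_combination_dict n keyname (create_combination_dict n keyname)

-- ===== LEMMAS AND PROOFS =====

lemma pvJoinNilCons (x : String) (xs : List String) :
    PySem.Str.join "" (x :: xs) = x ++ PySem.Str.join "" xs := by
  rw [← String.toList_inj]
  cases xs with
  | nil => simp [PySem.Str.toList_join, PySem.Chars.join_singleton, PySem.Chars.join_nil,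
      String.toList_append]
  | cons y ys => simp [PySem.Str.toList_join, PySem.Chars.join_cons_cons, String.toList_append]

lemma pvJoinNilNil : PySem.Str.join "" ([] : List String) = "" := by
  rw [← String.toList_inj]; simp [PySem.Str.toList_join, PySem.Chars.join_nil]

lemma pvSliceCancel (k t : String) :
    PySem.Str.slice (k ++ t) (some (PySem.Str.len k)) none = t := by
  rw [← String.toList_inj]
  rw [PySem.Str.toList_slice]
  simp [PySem.Str.len, String.toList_append,
    PySem.List.slice_from_natCast]

lemma pvCombosA_zero {α : Type} (xs : List α) : pvCombosA xs 0 = [[]] := by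
  cases xs <;> rfl

lemma pvCombosA_map {α β : Type} (f : α → β) (l : List α) (r : Nat) :
    pvCombosA (l.map f) r = (pvCombosA l r).map (List.map f) := by
  induction l generalizing r with
  | nil => cases r <;> rfl
  | cons x rest ih =>
    cases r with
    | zero => rfl
    | succ r => simp [pvCombosA, ih, Function.comp]

lemma pvRangeShift (a b : Int) :
    PySem.List.pyRange (a + 1) (b + 1) 1 = (PySem.List.pyRange a b 1).map (· + 1) := by
  rw [PySem.List.pyRange_one, PySem.List.pyRange_one]
  have h : b + 1 - (a + 1) = b - a := by ring
  rw [h]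
  simp [List.map_map, Function.comp]
  intro k _
  ring

lemma pvCombosB_flat (n : Int) (r : Nat) (start : Int) :
    pvCombosB n (r + 1) start =
      (PySem.List.pyRange start (n + 1) 1).flatMap
        (fun i => (pvCombosB n r (i + 1)).map (fun t => PySem.Int.toStr i ++ t)) := by
  show (PySem.List.pyRange start (n + 1) 1).foldl _ [] = _
  have h : ∀ (out : List String) (i : Int),
      (pvCombosB n r (i + 1)).foldl (fun out tail => out ++ [PySem.Int.toStr i ++ tail]) out
        = out ++ (pvCombosB n r (i + 1)).map (fun t => PySem.Int.toStr i ++ t) := by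
    intro out i
    exact PySem.List.foldl_append_singleton_eq_map _ _ _
  simp only [h]
  rw [PySem.List.foldl_append_eq_flatMap]
  simp

-- main correspondence: B's generator is A's index combinations, joined to strings
lemma pvCombosB_eq (n : Int) (r : Nat) :
    ∀ (m : Nat) (start : Int), (n + 1 - start).toNat = m →
      pvCombosB n r start =
        (pvCombosA (PySem.List.pyRange start (n + 1) 1) r).map
          (fun c => PySem.Str.join "" (c.map PySem.Int.toStr)) := by
  induction r with
  | zero =>
    intro m start _
    simp [pvCombosB, pvCombosA_zero, pvJoinNilNil]
  | succ r ih =>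
    intro m
    induction m with
    | zero =>
      intro start h
      have hle : n + 1 ≤ start := by omega
      rw [pvCombosB_flat, PySem.List.pyRange_one_eq_nil hle]
      rfl
    | succ m ihm =>
      intro start h
      have hlt : start < n + 1 := by omega
      rw [pvCombosB_flat, PySem.List.pyRange_one_cons hlt]
      rw [List.flatMap_cons]
      have hrest : (PySem.List.pyRange (start + 1) (n + 1) 1).flatMap
          (fun i => (pvCombosB n r (i + 1)).map (fun t => PySem.Int.toStr i ++ t))
          = pvCombosB n (r + 1) (start + 1) := (pvCombosB_flat n r (start + 1)).symm
      rw [hrest, ihm (start + 1) (by omega)]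
      rw [ih ((n + 1 - (start + 1)).toNat) (start + 1) rfl]
      simp only [pvCombosA, List.map_append, List.map_map]
      congr 1
      apply List.map_congr_left
      intro c _
      simp [Function.comp, pvJoinNilCons]

lemma pvInnerFoldEq (n : Int) (keyname : String) (rn : Nat)
    (d : PySem.Dict String (List String)) :
    (pvCombosA ((PySem.List.pyRange 0 n 1).map
        (fun i => keyname ++ PySem.Int.toStr (i + 1))) rn).foldl
      (fun d combo =>
        d.insert (keyname ++ PySem.Str.join ""
          (combo.map (fun elem =>
            PySem.Str.slice elem (some (PySem.Str.len keyname)) none))) ([] : List String)) d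
    = (pvCombosB n rn 1).foldl
        (fun d suffix => d.insert (keyname ++ suffix) ([] : List String)) d := by
  rw [pvCombosA_map, List.foldl_map]
  rw [pvCombosB_eq n rn (n + 1 - 1).toNat 1 rfl, List.foldl_map]
  have h1 : PySem.List.pyRange 1 (n + 1) 1 = (PySem.List.pyRange 0 n 1).map (· + 1) := by
    have := pvRangeShift 0 n
    simpa using this
  rw [h1, pvCombosA_map, List.foldl_map]
  apply PySem.List.foldl_congr_mem
  intro acc c _
  have hmap : (List.map (fun i => keyname ++ PySem.Int.toStr (i + 1)) c).map
      (fun elem => PySem.Str.slice elem (some (PySem.Str.len keyname)) none)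
      = c.map (fun i => PySem.Int.toStr (i + 1)) := by
    rw [List.map_map]
    apply List.map_congr_left
    intro i _
    exact pvSliceCancel keyname (PySem.Int.toStr (i + 1))
  simp only [List.map_map] at hmap ⊢
  rw [hmap]
  rfl

-- ===== VERDICT (by name: the statement is the Claim_ definition above) =====
theorem create_combination_dict_spec : Claim_equal_create_combination_dict := by
  intro n keyname _
  unfold Spec_create_combination_dict create_combination_dict create_combination_dict_alt
  dsimp only
  apply congrArg
  apply PySem.List.foldl_congr_mem
  intro d r _
  exact pvInnerFoldEq n keyname r.toNat d
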